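-- pv_equiv track=rewrite | github.com/recwebtek/braindrain | braindrain/workspace_primer.py | _filter_ruler_toml_agents
-- ===== SOURCE A (Python) =====
-- def _filter_ruler_toml_agents(toml_content: str, agents: list[str]) -> str:
--     """
--     Strip [agents] table entries that are NOT in the given agents list.
--
--     Operates as a simple line-by-line filter — preserves comments, formatting,
--     and all other TOML sections intact.  Only removes lines of the form:
--         <key> = { source = "RULES.md" }
--     when <key> is not in the agents set.
--     """
--     agent_set = set(agents)
--     lines = toml_content.splitlines(keepends=True)
--     result: list[str] = []
--     in_agents_table = False
--
--     for line in lines: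
--         stripped = line.strip()
--
--         # Detect section headers.
--         if stripped.startswith("["):
--             in_agents_table = stripped == "[agents]"
--             result.append(line)
--             continue
--
--         if in_agents_table:
--             # Skip blank lines and comments unconditionally inside [agents].
--             if not stripped or stripped.startswith("#"):
--                 result.append(line)
--                 continue
--             # key = { ... } lines: keep only if key is in agent_set.
--             key = stripped.split("=")[0].strip()
--             if key in agent_set:
--                 result.append(line)
--             # else: silently drop the entry.
--         else:
--             result.append(line)
--
--     return "".join(result)
-- ===== SOURCE B (Python) =====
-- def _filter_ruler_toml_agents(toml_content: str, agents: list[str]) -> str: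
--     agent_set = set(agents)
--     lines = toml_content.splitlines(keepends=True)
--
--     def is_header(line: str) -> bool:
--         return line.strip().startswith("[")
--
--     def keep(line: str) -> bool:
--         s = line.strip()
--         return (not s) or s.startswith("#") or s.split("=")[0].strip() in agent_set
--
--     out: list[str] = []
--     i, n = 0, len(lines)
--     while i < n:
--         # block = lines[i:j]: the line at i plus following non-header lines
--         j = i + 1
--         while j < n and not is_header(lines[j]):
--             j += 1
--         block = lines[i:j]
--         if block[0].strip() == "[agents]":
--             out.append(block[0])
--             out.extend(l for l in block[1:] if keep(l))
--         else:
--             out.extend(block)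
--         i = j
--     return "".join(out)
-- ===== Notes on version B (the rewrite author's own statement) =====
-- stated objective: alternative
-- what changed: Replaces A's single line-by-line pass that threads an in_agents_table boolean flag with a two-level decomposition: the lines are first partitioned into contiguous section blocks (a block starts at each header line), then each [agents] block has its body filtered while every other block is copied wholesale.
import Mathlib
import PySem

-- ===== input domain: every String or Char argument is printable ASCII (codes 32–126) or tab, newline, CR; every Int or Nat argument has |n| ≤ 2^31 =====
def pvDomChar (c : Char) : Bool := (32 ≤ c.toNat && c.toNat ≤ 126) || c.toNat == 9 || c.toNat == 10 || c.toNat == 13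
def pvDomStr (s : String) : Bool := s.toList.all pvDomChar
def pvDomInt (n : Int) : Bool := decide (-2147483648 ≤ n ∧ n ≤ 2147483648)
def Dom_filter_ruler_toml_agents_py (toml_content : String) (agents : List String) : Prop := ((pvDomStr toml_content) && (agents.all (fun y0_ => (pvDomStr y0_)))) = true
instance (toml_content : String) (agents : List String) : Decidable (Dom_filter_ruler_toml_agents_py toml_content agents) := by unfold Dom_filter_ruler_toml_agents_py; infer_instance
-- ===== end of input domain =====

-- B re-groups the lines into contiguous section blocks and filters the body of each
-- [agents] block wholesale, instead of A's single pass with a carried in-table flag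
-- (alternative decomposition, same cost; return value only, no mutation involved).


-- str.splitlines(keepends=True): exact on the Dom alphabet, whose only line
-- boundaries are '\n', '\r' and '\r\n' (both ports call this Python builtin).
def pvSplitKeepAux : List Char → List Char → List (List Char)
  | acc, [] => if acc.isEmpty then [] else [acc.reverse]
  | acc, '\r' :: '\n' :: cs => (acc.reverse ++ ['\r', '\n']) :: pvSplitKeepAux [] cs
  | acc, '\r' :: cs => (acc.reverse ++ ['\r']) :: pvSplitKeepAux [] cs
  | acc, '\n' :: cs => (acc.reverse ++ ['\n']) :: pvSplitKeepAux [] cs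
  | acc, c :: cs => pvSplitKeepAux (c :: acc) cs
  termination_by _ cs => cs.length

def pvSplitLinesKeep (s : String) : List String :=
  (pvSplitKeepAux [] s.toList).map String.ofList

-- ===== PORT A =====
-- one iteration of A's for-loop over (result, in_agents_table)
def pvAStep (agentSet : PySem.Set String) (st : List String × Bool) (line : String) : List String × Bool :=
  let stripped := PySem.Str.strip line
  if PySem.Str.startswith stripped "[" then
    (st.1 ++ [line], stripped == "[agents]")
  else if st.2 then
    if PySem.Str.len stripped == 0 || PySem.Str.startswith stripped "#" then
      (st.1 ++ [line], st.2)
    else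
      let key := PySem.Str.strip (((PySem.Str.split? stripped "=").getD []).headD "")
      if agentSet.contains key then (st.1 ++ [line], st.2) else (st.1, st.2)
  else
    (st.1 ++ [line], st.2)

def filter_ruler_toml_agents_py (toml_content : String) (agents : List String) : String :=
  let agentSet := PySem.Set.ofList agents
  let lines := pvSplitLinesKeep toml_content
  let res := lines.foldl (pvAStep agentSet) ([], false)
  PySem.Str.join "" res.1

-- ===== PORT B =====
def pvIsHeader (line : String) : Bool :=
  PySem.Str.startswith (PySem.Str.strip line) "["

def pvKeep (agentSet : PySem.Set String) (line : String) : Bool :=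
  let s := PySem.Str.strip line
  PySem.Str.len s == 0 || PySem.Str.startswith s "#" ||
    agentSet.contains (PySem.Str.strip (((PySem.Str.split? s "=").getD []).headD ""))

-- B's outer while loop: each block is the line at i plus the following non-header lines
def pvBBlocks : List String → List (List String)
  | [] => []
  | l :: ls =>
    (l :: ls.takeWhile (fun x => !pvIsHeader x)) :: pvBBlocks (ls.dropWhile (fun x => !pvIsHeader x))
  termination_by ls => ls.length
  decreasing_by simpa using Nat.lt_succ_of_le (List.length_dropWhile_le _ _)

def pvBProcBlock (agentSet : PySem.Set String) (block : List String) : List String :=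
  match block with
  | [] => []
  | h :: t =>
    if PySem.Str.strip h == "[agents]" then h :: t.filter (pvKeep agentSet)
    else h :: t

def filter_ruler_toml_agents_py_alt (toml_content : String) (agents : List String) : String :=
  let agentSet := PySem.Set.ofList agents
  let lines := pvSplitLinesKeep toml_content
  PySem.Str.join "" ((pvBBlocks lines).map (pvBProcBlock agentSet)).flatten

-- ===== PRECONDITION & SPEC =====
def Spec_filter_ruler_toml_agents_py (toml_content : String) (agents : List String) (out : String) : Prop := out = filter_ruler_toml_agents_py_alt toml_content agents
instance (toml_content : String) (agents : List String) (out : String) : Decidable (Spec_filter_ruler_toml_agents_py toml_content agents out) := by unfold Spec_filter_ruler_toml_agents_py; infer_instance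

-- ===== CLAIM (what is proved, stated in full; the proofs are below) =====
def Claim_equal_filter_ruler_toml_agents_py : Prop := ∀ (toml_content : String) (agents : List String), Dom_filter_ruler_toml_agents_py toml_content agents → Spec_filter_ruler_toml_agents_py toml_content agents (filter_ruler_toml_agents_py toml_content agents)

-- ===== LEMMAS AND PROOFS =====

-- the list of kept lines A produces from `lines` starting in state `b`
def pvAGo (agentSet : PySem.Set String) : Bool → List String → List String
  | _, [] => []
  | b, l :: ls =>
    let stripped := PySem.Str.strip l
    if PySem.Str.startswith stripped "[" then
      l :: pvAGo agentSet (stripped == "[agents]") ls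
    else if b then
      if PySem.Str.len stripped == 0 || PySem.Str.startswith stripped "#" then
        l :: pvAGo agentSet b ls
      else if agentSet.contains
          (PySem.Str.strip (((PySem.Str.split? stripped "=").getD []).headD "")) then
        l :: pvAGo agentSet b ls
      else
        pvAGo agentSet b ls
    else
      l :: pvAGo agentSet b ls

theorem pvFoldl_eq_aGo (agentSet : PySem.Set String) (lines : List String) :
    ∀ (acc : List String) (b : Bool),
      (lines.foldl (pvAStep agentSet) (acc, b)).1 = acc ++ pvAGo agentSet b lines := by
  induction lines with
  | nil => intro acc b; simp [pvAGo]
  | cons l ls ih =>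
    intro acc b
    simp only [List.foldl_cons, pvAStep, pvAGo]
    split_ifs <;> simp [ih]

theorem pvAGo_header_indep (agentSet : PySem.Set String) (rest : List String)
    (h : rest = [] ∨ ∃ h t, rest = h :: t ∧ pvIsHeader h = true) (b : Bool) :
    pvAGo agentSet b rest = pvAGo agentSet false rest := by
  rcases h with h | ⟨x, t, rfl, hx⟩
  · subst h; rfl
  · simp only [pvIsHeader] at hx
    simp at hx
    simp [pvAGo, hx]

theorem pvAGo_false_nonheader (agentSet : PySem.Set String) (pre : List String)
    (h : ∀ x ∈ pre, pvIsHeader x = false) (rest : List String) :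
    pvAGo agentSet false (pre ++ rest) = pre ++ pvAGo agentSet false rest := by
  induction pre with
  | nil => rfl
  | cons x xs ih =>
    have hx : pvIsHeader x = false := h x (by simp)
    simp only [pvIsHeader] at hx
    simp at hx
    simp only [List.cons_append, pvAGo]
    simp [hx, ih (fun y hy => h y (by simp [hy]))]

theorem pvAGo_true_nonheader (agentSet : PySem.Set String) (pre : List String)
    (h : ∀ x ∈ pre, pvIsHeader x = false) (rest : List String) :
    pvAGo agentSet true (pre ++ rest) =
      pre.filter (pvKeep agentSet) ++ pvAGo agentSet true rest := by
  induction pre with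
  | nil => rfl
  | cons x xs ih =>
    have hx : pvIsHeader x = false := h x (by simp)
    simp only [pvIsHeader] at hx
    simp at hx
    have ih' := ih (fun y hy => h y (by simp [hy]))
    simp only [List.cons_append, pvAGo, List.filter_cons, pvKeep]
    by_cases h1 : PySem.Chars.strip x.toList = [] ∨
        PySem.Chars.startswith (PySem.Chars.strip x.toList) ['#'] = true
    · simp [hx, h1, ih']
    · by_cases h2 : PySem.Str.strip
          (((PySem.Str.split? (PySem.Str.strip x) "=").getD []).head?.getD "") ∈ agentSet
      · simp [hx, h1, h2, ih']
      · simp [hx, h1, h2, ih']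

theorem pvDropWhile_shape (p : String → Bool) (ls : List String) :
    ls.dropWhile p = [] ∨ ∃ h t, ls.dropWhile p = h :: t ∧ p h = false := by
  induction ls with
  | nil => left; rfl
  | cons x xs ih =>
    by_cases hx : p x = true
    · simpa [hx] using ih
    · right; exact ⟨x, xs, by simp [hx], by simpa using hx⟩

theorem pvHeader_of_eq_agents (l : String)
    (h : (PySem.Str.strip l == "[agents]") = true) :
    PySem.Str.startswith (PySem.Str.strip l) "[" = true := by
  have : PySem.Str.strip l = "[agents]" := by exact_mod_cast eq_of_beq h
  rw [this]; decide

theorem pvMain (agentSet : PySem.Set String) :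
    ∀ (n : Nat) (lines : List String), lines.length ≤ n →
      pvAGo agentSet false lines = ((pvBBlocks lines).map (pvBProcBlock agentSet)).flatten := by
  intro n
  induction n with
  | zero =>
    intro lines h
    have : lines = [] := List.eq_nil_of_length_eq_zero (Nat.le_zero.mp h)
    subst this; simp [pvAGo, pvBBlocks]
  | succ n ih =>
    intro lines hlen
    match lines with
    | [] => simp [pvAGo, pvBBlocks]
    | l :: ls =>
      set pre := ls.takeWhile (fun x => !pvIsHeader x) with hpre
      set rest := ls.dropWhile (fun x => !pvIsHeader x) with hrest
      have hsplit : pre ++ rest = ls := List.takeWhile_append_dropWhile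
      have hpreNH : ∀ x ∈ pre, pvIsHeader x = false := by
        intro x hx
        have := List.mem_takeWhile_imp hx
        simpa using this
      have hrestShape : rest = [] ∨ ∃ h t, rest = h :: t ∧ pvIsHeader h = true := by
        rcases pvDropWhile_shape (fun x => !pvIsHeader x) ls with h | ⟨x, t, hxt, hx⟩
        · left; exact h
        · right; exact ⟨x, t, hxt, by simpa using hx⟩
      have hrestLen : rest.length ≤ n := by
        have h1 : rest.length ≤ ls.length := List.length_dropWhile_le _ _
        have h2 : ls.length ≤ n := by simpa using Nat.le_of_succ_le_succ hlen
        omega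
      have ihrest := ih rest hrestLen
      rw [pvBBlocks]
      simp only [List.map_cons, List.flatten_cons, ← hpre, ← hrest]
      by_cases hl : PySem.Str.startswith (PySem.Str.strip l) "[" = true
      · -- l is a header line
        simp only [pvAGo, hl, if_true, ← hsplit]
        by_cases ha : (PySem.Str.strip l == "[agents]") = true
        · rw [ha]
          rw [pvAGo_true_nonheader agentSet pre hpreNH rest,
              pvAGo_header_indep agentSet rest hrestShape true, ihrest]
          simp [pvBProcBlock, ha]
        · have hna : (PySem.Str.strip l == "[agents]") = false := by
            cases hb : (PySem.Str.strip l == "[agents]") <;> simp_all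
          rw [hna, pvAGo_false_nonheader agentSet pre hpreNH rest, ihrest]
          simp only [pvBProcBlock]
          rw [hna]
          simp
      · -- l is not a header line
        have hna : (PySem.Str.strip l == "[agents]") = false := by
          cases hb : (PySem.Str.strip l == "[agents]")
          · rfl
          · exact absurd (pvHeader_of_eq_agents l hb) hl
        simp only [pvAGo, hl, if_false, Bool.false_eq_true]
        rw [← hsplit, pvAGo_false_nonheader agentSet pre hpreNH rest, ihrest]
        simp [pvBProcBlock, hna]

-- ===== VERDICT (by name: the statement is the Claim_ definition above) =====
theorem filter_ruler_toml_agents_py_spec : Claim_equal_filter_ruler_toml_agents_py := by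
  intro toml_content agents _
  unfold Spec_filter_ruler_toml_agents_py
  unfold filter_ruler_toml_agents_py filter_ruler_toml_agents_py_alt
  simp only []
  rw [pvFoldl_eq_aGo, List.nil_append,
      pvMain (PySem.Set.ofList agents) (pvSplitLinesKeep toml_content).length _ le_rfl]
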